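-- pv_equiv track=rewrite | github.com/junyoung7727/Kill_Mijuma | Dimi_Kensho/llm_translate.py | get_latest_context_data
-- ===== SOURCE A (Python) =====
-- def get_latest_context_data(data_list):
--     """데이터 리스트에서 가장 최근 컨텍스트의 데이터만 반환"""
--     if not data_list or not isinstance(data_list, list):
--         return None
--
--     # 먼저 'c-1' context 찾기
--     c1_data = next((item for item in data_list
--                    if item.get('attributes', {}).get('contextref') == 'c-1'), None)
--     if c1_data:
--         return c1_data
--
--     # 'c-1'이 없으면 가장 작은 숫자의 context 선택
--     sorted_data = sorted(data_list,
--                        key=lambda x: int(x.get('attributes', {}).get('contextref', '').split('-')[-1])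
--                        if x.get('attributes', {}).get('contextref', '').split('-')[-1].isdigit()
--                        else float('inf'))
--
--     return sorted_data[0] if sorted_data else None
-- ===== SOURCE B (Python) =====
-- def get_latest_context_data(data_list):
--     if not data_list or not isinstance(data_list, list):
--         return None
--
--     def key(item):
--         ref = item.get('attributes', {}).get('contextref')
--         if ref == 'c-1':
--             return (0, 0)
--         s = (ref or '').split('-')[-1]
--         if s.isdigit():
--             return (1, int(s))
--         return (2, 0)
--
--     return min(data_list, key=key)
-- ===== Notes on version B (the rewrite author's own statement) =====
-- stated objective: simpler
-- what changed: Replaced A's two passes (a separate scan for a 'c-1' item followed by a full stable sort just to take its first element) by one min() pass with a composite (priority, number) key that puts 'c-1' first, numeric contextrefs next in ascending order, and non-numeric ones last.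
import Mathlib
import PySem

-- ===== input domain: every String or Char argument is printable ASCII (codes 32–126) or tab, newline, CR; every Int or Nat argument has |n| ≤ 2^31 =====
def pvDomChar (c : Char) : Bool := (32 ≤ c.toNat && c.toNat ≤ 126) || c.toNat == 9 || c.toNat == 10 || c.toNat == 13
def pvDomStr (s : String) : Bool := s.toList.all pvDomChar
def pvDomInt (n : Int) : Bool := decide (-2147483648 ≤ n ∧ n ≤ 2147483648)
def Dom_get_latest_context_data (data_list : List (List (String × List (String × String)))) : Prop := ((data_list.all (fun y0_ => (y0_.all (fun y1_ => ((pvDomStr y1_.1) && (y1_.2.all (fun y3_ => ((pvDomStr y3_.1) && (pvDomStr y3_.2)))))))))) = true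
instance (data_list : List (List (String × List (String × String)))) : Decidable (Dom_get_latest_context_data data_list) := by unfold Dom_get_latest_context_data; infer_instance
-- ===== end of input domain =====

-- B replaces A's two passes (scan for a 'c-1' item, then a full stable sort taken at [0])
-- by a single min() pass with a composite (priority, number) key; return values only, no mutation.

abbrev PvItem : Type := List (String × List (String × String))

-- ===== PORT A =====
-- item.get('attributes', {}).get('contextref')  (dicts are association lists; first-match lookup)
def pvRefA (item : PvItem) : Option String :=
  (PySem.Dict.mk ((PySem.Dict.mk item).getD "attributes" [])).get? "contextref"

-- x.get('attributes', {}).get('contextref', '').split('-')[-1]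
def pvTailA (item : PvItem) : String :=
  PySem.List.pyGetD (((PySem.Str.split? ((pvRefA item).getD "") "-").getD [])) (-1) ""

-- A's sort key "int(s) if s.isdigit() else float('inf')" is encoded exactly as the pair
-- (pvK1A, pvK2A) under sorted2's lexicographic rule: finite ints are (0, value) in value
-- order, float('inf') is (1, 0), which compares greater than every finite int.
def pvK1A (item : PvItem) : Int :=
  if PySem.Str.strIsdigit (pvTailA item) then 0 else 1
def pvK2A (item : PvItem) : Int :=
  if PySem.Str.strIsdigit (pvTailA item) then (PySem.Int.ofStr? (pvTailA item)).getD 0 else 0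

def get_latest_context_data (data_list : List (List (String × List (String × String)))) : Option (List (String × List (String × String))) :=
  if data_list = [] then none
  else
    -- c1_data = next((item for item in data_list if …), None)
    let c1_data := data_list.find? (fun item => pvRefA item == some "c-1")
    -- 'if c1_data:' — truthy means: not None AND a non-empty dict
    if (match c1_data with | some x => !x.isEmpty | none => false) then c1_data
    else (PySem.List.sorted2 data_list pvK1A pvK2A).head?

-- ===== PORT B =====
def pvRefB (item : PvItem) : Option String :=
  (PySem.Dict.mk ((PySem.Dict.mk item).getD "attributes" [])).get? "contextref"

-- key(item): (0,0) for 'c-1'; (1, int(s)) for numeric tails; (2, 0) otherwise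
def pvKeyB (item : PvItem) : Int × Int :=
  if pvRefB item == some "c-1" then (0, 0)
  else
    let s := PySem.List.pyGetD (((PySem.Str.split? ((pvRefB item).getD "") "-").getD [])) (-1) ""
    if PySem.Str.strIsdigit s then (1, (PySem.Int.ofStr? s).getD 0) else (2, 0)

def get_latest_context_data_alt (data_list : List (List (String × List (String × String)))) : Option (List (String × List (String × String))) :=
  if data_list = [] then none
  else PySem.List.min2? data_list (fun i => (pvKeyB i).1) (fun i => (pvKeyB i).2)

-- ===== PRECONDITION & SPEC =====
def Spec_get_latest_context_data (data_list : List (List (String × List (String × String)))) (out : Option (List (String × List (String × String)))) : Prop := out = get_latest_context_data_alt data_list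
instance (data_list : List (List (String × List (String × String)))) (out : Option (List (String × List (String × String)))) : Decidable (Spec_get_latest_context_data data_list out) := by unfold Spec_get_latest_context_data; infer_instance

-- ===== CLAIM (what is proved, stated in full; the proofs are below) =====
def Claim_equal_get_latest_context_data : Prop := ∀ (data_list : List (List (String × List (String × String)))), Dom_get_latest_context_data data_list → Spec_get_latest_context_data data_list (get_latest_context_data data_list)

-- ===== LEMMAS AND PROOFS =====

-- the boolean "strictly before" tests the two folds use
def pvLtA (x m : PvItem) : Bool :=
  decide (pvK1A x < pvK1A m) || (!decide (pvK1A m < pvK1A x) && decide (pvK2A x < pvK2A m))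
def pvLtB (x m : PvItem) : Bool :=
  decide ((pvKeyB x).1 < (pvKeyB m).1) || (!decide ((pvKeyB m).1 < (pvKeyB x).1) && decide ((pvKeyB x).2 < (pvKeyB m).2))

-- the running-minimum step both min2? and the head of the insertion sort satisfy
def pvMinStep {α : Type} (lt : α → α → Bool) (acc : Option α) (x : α) : Option α :=
  match acc with
  | none => some x
  | some m => if lt x m then some x else some m

lemma pv_head_insertBy {α : Type} (before : α → α → Bool) (x : α) (acc : List α) :
    (PySem.List.insertBy before x acc).head? = pvMinStep before acc.head? x := by
  cases acc with
  | nil => simp [PySem.List.insertBy, pvMinStep]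
  | cons y ys => by_cases h : before x y <;> simp [PySem.List.insertBy, pvMinStep, h]

lemma pv_head_sortfold {α : Type} (before : α → α → Bool) (xs : List α) (acc : List α) :
    (xs.foldl (fun a x => PySem.List.insertBy before x a) acc).head? =
      xs.foldl (pvMinStep before) acc.head? := by
  induction xs generalizing acc with
  | nil => rfl
  | cons x xs ih => simp only [List.foldl_cons, ih, pv_head_insertBy]

lemma pv_minfold_congr {α : Type} (ltA ltB : α → α → Bool) (dl : List α)
    (h : ∀ x ∈ dl, ∀ m ∈ dl, ltA x m = ltB x m) :
    ∀ xs : List α, (∀ x ∈ xs, x ∈ dl) →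
      ∀ acc : Option α, (∀ m, acc = some m → m ∈ dl) →
        xs.foldl (pvMinStep ltA) acc = xs.foldl (pvMinStep ltB) acc := by
  intro xs
  induction xs with
  | nil => intro _ acc _; rfl
  | cons x xs ih =>
    intro hsub acc hacc
    have hx : x ∈ dl := hsub x (by simp)
    have hstep : pvMinStep ltA acc x = pvMinStep ltB acc x := by
      cases acc with
      | none => rfl
      | some m => simp [pvMinStep, h x hx m (hacc m rfl)]
    have hmem : ∀ m, pvMinStep ltB acc x = some m → m ∈ dl := by
      intro m hm
      cases acc with
      | none => simp [pvMinStep] at hm; exact hm ▸ hx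
      | some m0 =>
        by_cases hb : ltB x m0 <;> simp [pvMinStep, hb] at hm
        · exact hm ▸ hx
        · exact hm ▸ hacc m0 rfl
    rw [List.foldl_cons, List.foldl_cons, hstep]
    exact ih (fun y hy => hsub y (List.mem_cons_of_mem _ hy)) _ hmem

-- pvKeyB's value in terms of A's key helpers (pvRefB/pvRefA are definitionally equal)
lemma pvKeyB_eq (i : PvItem) :
    pvKeyB i =
      if pvRefA i == some "c-1" then ((0 : Int), (0 : Int))
      else (pvK1A i + 1, pvK2A i) := by
  by_cases h : pvRefA i == some "c-1" <;>
    simp [pvKeyB, pvRefB, pvK1A, pvK2A, pvTailA, pvRefA] <;>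
    by_cases hd : PySem.Str.strIsdigit (pvTailA i) <;>
    simp [pvTailA, pvRefA] at * <;> simp [hd]

lemma pv_lt_eq (x m : PvItem) (hx : (pvRefA x == some "c-1") = false)
    (hm : (pvRefA m == some "c-1") = false) : pvLtA x m = pvLtB x m := by
  simp only [pvLtA, pvLtB, pvKeyB_eq, hx, Bool.false_eq_true, if_false, hm]
  simp

lemma pv_keep (y : PvItem) (hy : (pvRefA y == some "c-1") = true) :
    ∀ ys : List PvItem, ys.foldl (pvMinStep pvLtB) (some y) = some y := by
  have hky : pvKeyB y = (0, 0) := by rw [pvKeyB_eq, if_pos hy]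
  intro ys
  induction ys with
  | nil => rfl
  | cons z zs ih =>
    have hlt : pvLtB z y = false := by
      by_cases hz : pvRefA z == some "c-1"
      · have : pvKeyB z = (0, 0) := by rw [pvKeyB_eq, if_pos hz]
        simp [pvLtB, this, hky]
      · have hz' : pvKeyB z = (pvK1A z + 1, pvK2A z) := by
          rw [pvKeyB_eq, if_neg (by simp_all)]
        have h1 : (0 : Int) ≤ pvK1A z := by unfold pvK1A; split <;> norm_num
        simp [pvLtB, hz', hky]
        omega
    rw [List.foldl_cons]
    simpa [pvMinStep, hlt] using ih

lemma pv_minfold_find :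
    ∀ (xs : List PvItem) (x : PvItem),
      xs.find? (fun i => pvRefA i == some "c-1") = some x →
      ∀ acc : Option PvItem,
        (acc = none ∨ ∃ m, acc = some m ∧ (pvRefA m == some "c-1") = false) →
        xs.foldl (pvMinStep pvLtB) acc = some x := by
  intro xs
  induction xs with
  | nil => intro x hf; simp at hf
  | cons y ys ih =>
    intro x hf acc hacc
    by_cases hp : (pvRefA y == some "c-1") = true
    · simp only [List.find?_cons, hp] at hf
      have hstep : pvMinStep pvLtB acc y = some y := by
        rcases hacc with rfl | ⟨m, rfl, hm⟩
        · rfl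
        · have hky : pvKeyB y = (0, 0) := by rw [pvKeyB_eq, if_pos hp]
          have hkm : pvKeyB m = (pvK1A m + 1, pvK2A m) := by rw [pvKeyB_eq, if_neg (by simp_all)]
          have h1 : (0 : Int) ≤ pvK1A m := by unfold pvK1A; split <;> norm_num
          have hlt : pvLtB y m = true := by simp [pvLtB, hky, hkm]; omega
          simp [pvMinStep, hlt]
      rw [List.foldl_cons, hstep, pv_keep y hp ys]
      exact hf
    · have hpy : (pvRefA y == some "c-1") = false := by simpa using hp
      simp only [List.find?_cons, hpy] at hf
      refine ih x hf _ ?_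
      right
      rcases hacc with rfl | ⟨m, rfl, hm⟩
      · exact ⟨y, rfl, hpy⟩
      · by_cases hb : pvLtB y m
        · exact ⟨y, by simp [pvMinStep, hb], hpy⟩
        · exact ⟨m, by simp [pvMinStep, hb], hm⟩

lemma pv_find_ne_nil (dl : List PvItem) (x : PvItem)
    (hf : dl.find? (fun i => pvRefA i == some "c-1") = some x) : x.isEmpty = false := by
  have hp := List.find?_some hf
  cases x with
  | nil => simp [pvRefA, PySem.Dict.getD, PySem.Dict.get?] at hp
  | cons a l => rfl

-- ===== VERDICT (by name: the statement is the Claim_ definition above) =====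
theorem get_latest_context_data_spec : Claim_equal_get_latest_context_data := by
  intro dl _
  unfold Spec_get_latest_context_data get_latest_context_data get_latest_context_data_alt
  by_cases hnil : dl = []
  · simp [hnil]
  · rw [if_neg hnil, if_neg hnil]
    have hB : PySem.List.min2? dl (fun i => (pvKeyB i).1) (fun i => (pvKeyB i).2) =
        dl.foldl (pvMinStep pvLtB) none := rfl
    cases hf : dl.find? (fun item => pvRefA item == some "c-1") with
    | some x =>
      rw [hB, pv_minfold_find dl x hf none (Or.inl rfl)]
      simp [pv_find_ne_nil dl x hf]
    | none =>
      have hA : (PySem.List.sorted2 dl pvK1A pvK2A).head? =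
          dl.foldl (pvMinStep pvLtA) none := pv_head_sortfold pvLtA dl []
      have hnone := List.find?_eq_none.mp hf
      have hcongr := pv_minfold_congr pvLtA pvLtB dl
        (fun a ha b hb => pv_lt_eq a b (by simpa using hnone a ha) (by simpa using hnone b hb))
        dl (fun _ h => h) none (by simp)
      show (PySem.List.sorted2 dl pvK1A pvK2A).head? =
        PySem.List.min2? dl (fun i => (pvKeyB i).1) (fun i => (pvKeyB i).2)
      rw [hA, hB, hcongr]
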